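-- pv_equiv track=rewrite | github.com/longcipher/auto-research | src/autoresearch/templates/__init__.py | _render_technical
-- ===== SOURCE A (Python) =====
-- import typing
--
-- _SUMMARY_MAX_CHARS = 120
--
-- def _render_technical(topic: str, readings: list[dict[str, typing.Any]]) -> str:
--     lines: list[str] = []
--     lines.append(f"# {topic}\n")
--     lines.append("## Executive Summary\n")
--     if readings:
--         lines.append(
--             f"This technical report synthesizes findings from {len(readings)} sources "
--             f"on **{topic}**. The analysis covers implementation details, architecture "
--             "decisions, and performance characteristics.\n"
--         )
--     else:
--         lines.append("No sources were collected for this report.\n")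
--
--     lines.append("## Key Findings\n")
--     if readings:
--         for i, r in enumerate(readings, 1):
--             title = str(r.get("title", "Untitled"))
--             content = str(r.get("content", ""))
--             lines.append(
--                 f"{i}. **{title}**: {content[:_SUMMARY_MAX_CHARS]}{'...' if len(content) > _SUMMARY_MAX_CHARS else ''}"
--             )
--         lines.append("")
--     else:
--         lines.append("No findings available.\n")
--
--     lines.append("## Detailed Analysis\n")
--     if readings:
--         for r in readings:
--             title = str(r.get("title", "Untitled"))
--             content = str(r.get("content", ""))
--             lines.append(f"### {title}\n")
--             lines.append(f"{content}\n")
--     else: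
--         lines.append("No data to analyze.\n")
--
--     lines.append("## Sources\n")
--     if readings:
--         for r in readings:
--             title = str(r.get("title", "Untitled"))
--             url = str(r.get("url", ""))
--             lines.append(f"- [{title}]({url})")
--         lines.append("")
--     else:
--         lines.append("No sources were collected.\n")
--
--     return "\n".join(lines)
-- ===== SOURCE B (Python) =====
-- import typing
--
-- _SUMMARY_MAX_CHARS = 120
--
--
-- def _render_technical(topic: str, readings: list[dict[str, typing.Any]]) -> str:
--     # Single pass over the readings collecting all three per-reading sections at once.
--     findings: list[str] = []
--     analysis: list[str] = []
--     sources: list[str] = []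
--     for i, r in enumerate(readings, 1):
--         title = str(r.get("title", "Untitled"))
--         content = str(r.get("content", ""))
--         url = str(r.get("url", ""))
--         tail = "..." if len(content) > _SUMMARY_MAX_CHARS else ""
--         findings.append(f"{i}. **{title}**: {content[:_SUMMARY_MAX_CHARS]}{tail}")
--         analysis.append(f"### {title}\n")
--         analysis.append(f"{content}\n")
--         sources.append(f"- [{title}]({url})")
--
--     if readings:
--         summary = (
--             f"This technical report synthesizes findings from {len(readings)} sources "
--             f"on **{topic}**. The analysis covers implementation details, architecture "
--             "decisions, and performance characteristics.\n"
--         )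
--         findings.append("")
--         sources.append("")
--     else:
--         summary = "No sources were collected for this report.\n"
--         findings = ["No findings available.\n"]
--         analysis = ["No data to analyze.\n"]
--         sources = ["No sources were collected.\n"]
--
--     parts = (
--         [f"# {topic}\n", "## Executive Summary\n", summary, "## Key Findings\n"]
--         + findings
--         + ["## Detailed Analysis\n"]
--         + analysis
--         + ["## Sources\n"]
--         + sources
--     )
--     return "\n".join(parts)
-- ===== Notes on version B (the rewrite author's own statement) =====
-- stated objective: alternative
-- what changed: B replaces A's three separate per-section loops over readings with one fused pass over enumerate(readings, 1) that accumulates findings, analysis and sources lists simultaneously, then assembles the markdown from the collected parts.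
import Mathlib
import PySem

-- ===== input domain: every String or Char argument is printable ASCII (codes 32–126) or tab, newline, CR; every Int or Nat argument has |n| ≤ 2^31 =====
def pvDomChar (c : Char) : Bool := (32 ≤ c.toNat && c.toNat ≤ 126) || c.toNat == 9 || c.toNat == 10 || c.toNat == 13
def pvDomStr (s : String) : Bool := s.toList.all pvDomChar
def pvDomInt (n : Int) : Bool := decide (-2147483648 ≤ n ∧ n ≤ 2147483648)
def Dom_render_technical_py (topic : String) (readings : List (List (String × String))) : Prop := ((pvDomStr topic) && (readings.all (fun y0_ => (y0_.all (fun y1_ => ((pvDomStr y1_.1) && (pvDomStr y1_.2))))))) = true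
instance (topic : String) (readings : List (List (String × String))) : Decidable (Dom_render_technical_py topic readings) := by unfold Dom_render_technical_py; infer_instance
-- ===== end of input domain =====

-- B builds the three per-reading sections (findings, analysis, sources) in ONE pass over enumerate(readings, 1)
-- instead of A's three separate loops, then assembles the markdown; objective: alternative (same cost, different decomposition).

-- shared primitive: r.get(k, dflt) on the association-list dict
def pvGet (r : List (String × String)) (k dflt : String) : String :=
  (PySem.Dict.mk r).getD k dflt

-- ===== PORT A =====
def render_technical_py (topic : String) (readings : List (List (String × String))) : String :=
  let lines : List String := []
  let lines := lines ++ ["# " ++ topic ++ "\n"]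
  let lines := lines ++ ["## Executive Summary\n"]
  let lines :=
    if readings ≠ [] then
      lines ++ ["This technical report synthesizes findings from " ++
        PySem.Int.toStr (readings.length : Int) ++ " sources on **" ++ topic ++
        "**. The analysis covers implementation details, architecture decisions, and performance characteristics.\n"]
    else lines ++ ["No sources were collected for this report.\n"]
  let lines := lines ++ ["## Key Findings\n"]
  let lines :=
    if readings ≠ [] then
      ((PySem.List.enumerate readings 1).foldl (fun ls p =>
        let title := pvGet p.2 "title" "Untitled"
        let content := pvGet p.2 "content" ""
        ls ++ [PySem.Int.toStr p.1 ++ ". **" ++ title ++ "**: " ++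
          PySem.Str.slice content none (some 120) ++
          (if PySem.Str.len content > 120 then "..." else "")]) lines) ++ [""]
    else lines ++ ["No findings available.\n"]
  let lines := lines ++ ["## Detailed Analysis\n"]
  let lines :=
    if readings ≠ [] then
      readings.foldl (fun ls r =>
        let title := pvGet r "title" "Untitled"
        let content := pvGet r "content" ""
        ls ++ ["### " ++ title ++ "\n", content ++ "\n"]) lines
    else lines ++ ["No data to analyze.\n"]
  let lines := lines ++ ["## Sources\n"]
  let lines :=
    if readings ≠ [] then
      (readings.foldl (fun ls r =>
        let title := pvGet r "title" "Untitled"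
        let url := pvGet r "url" ""
        ls ++ ["- [" ++ title ++ "](" ++ url ++ ")"]) lines) ++ [""]
    else lines ++ ["No sources were collected.\n"]
  PySem.Str.join "\n" lines

-- ===== PORT B =====
-- loop body of B's single pass: state = (findings, analysis, sources)
def pvBStep (acc : List String × List String × List String) (p : Int × List (String × String)) :
    List String × List String × List String :=
  let title := pvGet p.2 "title" "Untitled"
  let content := pvGet p.2 "content" ""
  let url := pvGet p.2 "url" ""
  let tail := if PySem.Str.len content > 120 then "..." else ""
  (acc.1 ++ [PySem.Int.toStr p.1 ++ ". **" ++ title ++ "**: " ++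
      PySem.Str.slice content none (some 120) ++ tail],
   acc.2.1 ++ ["### " ++ title ++ "\n", content ++ "\n"],
   acc.2.2 ++ ["- [" ++ title ++ "](" ++ url ++ ")"])

def render_technical_py_alt (topic : String) (readings : List (List (String × String))) : String :=
  let acc := (PySem.List.enumerate readings 1).foldl pvBStep ([], [], [])
  let fas :=
    if readings ≠ [] then (acc.1 ++ [""], acc.2.1, acc.2.2 ++ [""])
    else (["No findings available.\n"], ["No data to analyze.\n"], ["No sources were collected.\n"])
  let summary :=
    if readings ≠ [] then
      "This technical report synthesizes findings from " ++
        PySem.Int.toStr (readings.length : Int) ++ " sources on **" ++ topic ++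
        "**. The analysis covers implementation details, architecture decisions, and performance characteristics.\n"
    else "No sources were collected for this report.\n"
  PySem.Str.join "\n"
    (["# " ++ topic ++ "\n", "## Executive Summary\n", summary, "## Key Findings\n"] ++
     fas.1 ++ ["## Detailed Analysis\n"] ++ fas.2.1 ++ ["## Sources\n"] ++ fas.2.2)

-- ===== PRECONDITION & SPEC =====
def Spec_render_technical_py (topic : String) (readings : List (List (String × String))) (out : String) : Prop := out = render_technical_py_alt topic readings
instance (topic : String) (readings : List (List (String × String))) (out : String) : Decidable (Spec_render_technical_py topic readings out) := by unfold Spec_render_technical_py; infer_instance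

-- ===== CLAIM (what is proved, stated in full; the proofs are below) =====
def Claim_equal_render_technical_py : Prop := ∀ (topic : String) (readings : List (List (String × String))), Dom_render_technical_py topic readings → Spec_render_technical_py topic readings (render_technical_py topic readings)

-- ===== LEMMAS AND PROOFS =====

-- B's fused fold splits into one map and two per-reading lists
theorem pvBStep_foldl (l : List (Int × List (String × String)))
    (a b c : List String) :
    l.foldl pvBStep (a, b, c) =
      (a ++ l.map (fun p =>
        PySem.Int.toStr p.1 ++ ". **" ++ pvGet p.2 "title" "Untitled" ++ "**: " ++
          PySem.Str.slice (pvGet p.2 "content" "") none (some 120) ++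
          (if PySem.Str.len (pvGet p.2 "content" "") > 120 then "..." else "")),
       b ++ l.flatMap (fun p =>
        ["### " ++ pvGet p.2 "title" "Untitled" ++ "\n", pvGet p.2 "content" "" ++ "\n"]),
       c ++ l.map (fun p =>
        "- [" ++ pvGet p.2 "title" "Untitled" ++ "](" ++ pvGet p.2 "url" "" ++ ")")) := by
  induction l generalizing a b c with
  | nil => simp
  | cons x xs ih =>
    simp only [List.foldl_cons, List.map_cons, List.flatMap_cons, pvBStep, ih]
    simp

theorem render_technical_py_spec : Claim_equal_render_technical_py := by
  intro topic readings _
  unfold Spec_render_technical_py render_technical_py render_technical_py_alt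
  rcases readings with _ | ⟨r, rs⟩
  · rfl
  · simp only [ne_eq, reduceCtorEq, not_false_eq_true, if_pos,
      pvBStep_foldl, PySem.List.foldl_append_singleton_eq_map,
      PySem.List.foldl_append_eq_flatMap]
    have hm := PySem.List.map_snd_enumerate (r :: rs) (1 : Int)
    congr 1
    rw [← hm, List.flatMap_map, List.map_map]
    simp [List.append_assoc, Function.comp]
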